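-- pv_equiv track=rewrite | github.com/KillianWasHere/103cipher | cypher.py | wrd_in_n_column_mtrx
-- ===== SOURCE A (Python) =====
-- def create_matrix(x, y):
--     return [[0 for j in range(x)] for i in range(y)]
--
-- def wrd_in_n_column_mtrx(string, n):
--     lenght = len(string)
--     k = 1
--     while ((k * n) < lenght):
--         k += 1
--     mtrx = create_matrix(n, k)
--     idx = 0
--     for i in range(len(mtrx)):
--         for j in range(len(mtrx[i])):
--             if (idx < len(string)):
--                 mtrx[i][j] = ord(string[idx])
--                 idx += 1
--     return mtrx
-- ===== SOURCE B (Python) =====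
-- def wrd_in_n_column_mtrx(string, n):
--     lenght = len(string)
--     k = 1
--     while ((k * n) < lenght):
--         k += 1
--     rows = []
--     for i in range(k):
--         chunk = string[i * n:(i + 1) * n]
--         rows.append([ord(c) for c in chunk] + [0] * (n - len(chunk)))
--     return rows
-- ===== Notes on version B (the rewrite author's own statement) =====
-- stated objective: simpler
-- what changed: Instead of pre-filling a k x n zero matrix and walking its cells with a global index and a bound check, B builds each row directly by slicing the string into n-sized chunks and padding the last chunk with zeros; the k while-loop is kept verbatim so behaviour on n<=0 (where A loops forever) is unchanged and excluded by Pre_.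
import Mathlib
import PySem

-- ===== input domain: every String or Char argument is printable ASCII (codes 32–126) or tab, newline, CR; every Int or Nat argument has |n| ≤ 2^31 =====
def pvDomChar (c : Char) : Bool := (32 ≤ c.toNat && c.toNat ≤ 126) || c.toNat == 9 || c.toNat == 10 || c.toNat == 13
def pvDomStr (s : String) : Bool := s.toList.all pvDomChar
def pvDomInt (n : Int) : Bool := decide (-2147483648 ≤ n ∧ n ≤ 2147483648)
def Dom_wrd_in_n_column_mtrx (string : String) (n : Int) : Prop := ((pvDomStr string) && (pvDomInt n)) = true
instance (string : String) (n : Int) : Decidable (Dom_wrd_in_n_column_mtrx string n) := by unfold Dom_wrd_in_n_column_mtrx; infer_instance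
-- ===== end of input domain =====

-- B builds rows by chunking the string instead of filling a zero matrix cell by cell (objective: simpler).

-- ===== PORT A =====
-- the 'while (k*n) < lenght: k += 1' loop; fuel only makes it total (under Pre_ it never runs out)
def pvKLoopA (lenght n : Int) : Int → Nat → Int
  | k, 0 => k
  | k, fuel + 1 => if k * n < lenght then pvKLoopA lenght n (k + 1) fuel else k

-- create_matrix(x, y)
def pvCreateMatrix (x y : Int) : List (List Int) :=
  (List.range y.toNat).map (fun _ => (List.range x.toNat).map (fun _ => (0 : Int)))

-- inner 'for j' loop over one row: fills cells with ord(string[idx]) while idx < len(string)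
def pvFillRow (s : List Char) : List Int → Nat → List Int × Nat
  | [], idx => ([], idx)
  | cell :: rest, idx =>
    if idx < s.length then
      let r := pvFillRow s rest (idx + 1)
      (((s.getD idx ' ').toNat : Int) :: r.1, r.2)
    else
      let r := pvFillRow s rest idx
      (cell :: r.1, r.2)

-- outer 'for i' loop over the rows, threading idx
def pvFillRows (s : List Char) : List (List Int) → Nat → List (List Int)
  | [], _ => []
  | row :: rest, idx =>
    let r := pvFillRow s row idx
    r.1 :: pvFillRows s rest r.2

def wrd_in_n_column_mtrx (string : String) (n : Int) : List (List Int) :=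
  let s := string.toList
  let lenght : Int := s.length
  let k := pvKLoopA lenght n 1 (s.length + 1)
  let mtrx := pvCreateMatrix n k
  pvFillRows s mtrx 0

-- ===== PORT B =====
def pvKLoopB (lenght n : Int) : Int → Nat → Int
  | k, 0 => k
  | k, fuel + 1 => if k * n < lenght then pvKLoopB lenght n (k + 1) fuel else k

def wrd_in_n_column_mtrx_alt (string : String) (n : Int) : List (List Int) :=
  let s := string.toList
  let lenght : Int := s.length
  let k := pvKLoopB lenght n 1 (s.length + 1)
  (List.range k.toNat).map (fun (i : Nat) =>
    let chunk := PySem.List.slice s (some ((i : Int) * n)) (some (((i : Int) + 1) * n))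
    chunk.map (fun c => (c.toNat : Int)) ++ List.replicate (n - (chunk.length : Int)).toNat (0 : Int))

-- ===== PRECONDITION & SPEC =====
-- Pre_ excludes exactly the inputs on which A never returns: for n < 0, and for n = 0 with a
-- non-empty string, the while loop 'while k*n < len(string)' runs forever (A returns on no such input).
def Pre_wrd_in_n_column_mtrx (string : String) (n : Int) : Prop :=
  0 < n ∨ (n = 0 ∧ string = "")
instance (string : String) (n : Int) : Decidable (Pre_wrd_in_n_column_mtrx string n) := by
  unfold Pre_wrd_in_n_column_mtrx; infer_instance

def pvWitness_wrd_in_n_column_mtrx : String × Int := ("HELLO", 2)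

def Spec_wrd_in_n_column_mtrx (string : String) (n : Int) (out : List (List Int)) : Prop := out = wrd_in_n_column_mtrx_alt string n
instance (string : String) (n : Int) (out : List (List Int)) : Decidable (Spec_wrd_in_n_column_mtrx string n out) := by unfold Spec_wrd_in_n_column_mtrx; infer_instance

-- ===== CLAIM (what is proved, stated in full; the proofs are below) =====
def Claim_equal_wrd_in_n_column_mtrx : Prop := ∀ (string : String) (n : Int), Dom_wrd_in_n_column_mtrx string n → Pre_wrd_in_n_column_mtrx string n → Spec_wrd_in_n_column_mtrx string n (wrd_in_n_column_mtrx string n)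

-- ===== LEMMAS AND PROOFS =====

theorem pvKLoopB_eq (lenght n : Int) (k : Int) (fuel : Nat) :
    pvKLoopB lenght n k fuel = pvKLoopA lenght n k fuel := by
  induction fuel generalizing k with
  | zero => rfl
  | succ f ih => simp only [pvKLoopA, pvKLoopB, ih]

-- one row of A: ords of the next chars, zero-padded
theorem pvFillRow_spec (s : List Char) (m idx : Nat) (h : idx ≤ s.length) :
    pvFillRow s (List.replicate m 0) idx =
      (((s.drop idx).take m).map (fun c => (c.toNat : Int)) ++
        List.replicate (m - (s.length - idx)) 0,
       min s.length (idx + m)) := by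
  induction m generalizing idx with
  | zero =>
    simp [pvFillRow, Nat.min_eq_right h]
  | succ m ih =>
    rw [List.replicate_succ]
    by_cases hlt : idx < s.length
    · rw [pvFillRow, if_pos hlt, ih (idx + 1) hlt]
      have hdrop : s.drop idx = s.getD idx ' ' :: s.drop (idx + 1) := by
        rw [List.getD_eq_getElem _ _ hlt]
        exact (List.drop_eq_getElem_cons hlt)
      simp only [Prod.mk.injEq]
      refine ⟨?_, by omega⟩
      rw [hdrop, List.take_succ_cons, List.map_cons, List.cons_append]
      have hc : m - (s.length - (idx + 1)) = m + 1 - (s.length - idx) := by omega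
      rw [hc]
    · rw [pvFillRow, if_neg hlt]
      have hidx : idx = s.length := by omega
      subst hidx
      rw [ih s.length le_rfl]
      simp only [Prod.mk.injEq, List.drop_length, List.take_nil, List.map_nil,
        List.nil_append, Nat.sub_self, Nat.sub_zero]
      exact ⟨by rw [List.replicate_succ], by omega⟩

-- a chunk row in drop/take form
def pvChunkRow (s : List Char) (j m : Nat) : List Int :=
  ((s.drop j).take m).map (fun c => (c.toNat : Int)) ++ List.replicate (m - (s.length - j)) 0

theorem pvChunkRow_past (s : List Char) (j j' m : Nat) (h : s.length ≤ j) (h' : s.length ≤ j') :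
    pvChunkRow s j m = pvChunkRow s j' m := by
  unfold pvChunkRow
  rw [List.drop_eq_nil_of_le h, List.drop_eq_nil_of_le h']
  simp
  omega

theorem pvFillRows_spec (s : List Char) (kk m idx : Nat) (h : idx ≤ s.length) :
    pvFillRows s (List.replicate kk (List.replicate m 0)) idx =
      (List.range kk).map (fun i => pvChunkRow s (idx + i * m) m) := by
  induction kk generalizing idx with
  | zero => rfl
  | succ kk ih =>
    rw [List.replicate_succ, pvFillRows, pvFillRow_spec s m idx h]
    rw [List.range_succ_eq_map]
    simp only [List.map_cons, List.map_map]
    congr 1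
    · simp [pvChunkRow]
    · rw [ih (min s.length (idx + m)) (Nat.min_le_left _ _)]
      apply List.map_congr_left
      intro i _
      simp only [Function.comp, Nat.succ_eq_add_one]
      by_cases hm : idx + m ≤ s.length
      · rw [Nat.min_eq_right hm]
        have harith : idx + m + i * m = idx + (i + 1) * m := by ring
        rw [harith]
      · have hmle : m ≤ (i + 1) * m := Nat.le_mul_of_pos_left m (Nat.succ_pos i)
        exact pvChunkRow_past s _ _ m (by omega) (by omega)

theorem pvCreateMatrix_eq (x y : Int) :
    pvCreateMatrix x y = List.replicate y.toNat (List.replicate x.toNat 0) := by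
  unfold pvCreateMatrix
  rw [List.map_const', List.map_const']
  simp

-- B's i-th row equals pvChunkRow for positive n
theorem pvAltRow_eq (s : List Char) (n : Int) (hn : 0 < n) (i : Nat) :
    (PySem.List.slice s (some ((i : Int) * n)) (some (((i : Int) + 1) * n))).map
        (fun c => (c.toNat : Int)) ++
      List.replicate
        ((n - ((PySem.List.slice s (some ((i : Int) * n)) (some (((i : Int) + 1) * n))).length : Int)).toNat) (0 : Int)
    = pvChunkRow s (i * n.toNat) n.toNat := by
  have hcast : ((n.toNat : Nat) : Int) = n := Int.toNat_of_nonneg hn.le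
  have h1 : ((i : Int) * n) = (((i * n.toNat : Nat) : Nat) : Int) := by
    push_cast [hcast]; ring
  have h2 : (((i : Int) + 1) * n) = (((i * n.toNat + n.toNat : Nat) : Nat) : Int) := by
    push_cast [hcast]; ring
  rw [h1, h2, PySem.List.slice_natCast]
  have h3 : i * n.toNat + n.toNat - i * n.toNat = n.toNat := by omega
  rw [h3]
  unfold pvChunkRow
  congr 1
  have hlen : ((s.drop (i * n.toNat)).take n.toNat).length
      = min n.toNat (s.length - i * n.toNat) := by simp
  rw [hlen]
  congr 1
  omega

-- ===== VERDICT (by name: the statement is the Claim_ definition above) =====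
theorem wrd_in_n_column_mtrx_spec : Claim_equal_wrd_in_n_column_mtrx := by
  intro string n _hdom hpre
  show wrd_in_n_column_mtrx string n = wrd_in_n_column_mtrx_alt string n
  rcases hpre with hn | ⟨hn0, hs⟩
  · simp only [wrd_in_n_column_mtrx, wrd_in_n_column_mtrx_alt, pvKLoopB_eq]
    rw [pvCreateMatrix_eq,
      pvFillRows_spec string.toList _ n.toNat 0 (Nat.zero_le _)]
    apply List.map_congr_left
    intro i _
    rw [Nat.zero_add]
    exact (pvAltRow_eq string.toList n hn i).symm
  · subst hn0; subst hs; decide
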